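-- pv_equiv track=rewrite | github.com/Bmoist/ChordSense | style-diff.py | trim_incomplete_chord_seq
-- ===== SOURCE A (Python) =====
-- def trim_incomplete_chord_seq(clist):
--     """
--     For sequences not ending on '.', or [cls], it could be C, maj, add, (missing info here)
--     :param clist:
--     :return:
--     """
--     if clist[-1] == '[cls]' or clist[-1] == '.':
--         return clist
--     else:
--         nearest_end = len(clist) - 1
--         while nearest_end > 0 and clist[nearest_end] != '.':
--             nearest_end -= 1
--         return clist[:nearest_end]
-- ===== SOURCE B (Python) =====
-- def trim_incomplete_chord_seq(clist):
--     if clist[-1] == '[cls]' or clist[-1] == '.':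
--         return clist
--     last_dot = 0
--     for i in range(len(clist)):
--         if clist[i] == '.':
--             last_dot = i
--     return clist[:last_dot]
-- ===== Notes on version B (the rewrite author's own statement) =====
-- stated objective: alternative
-- what changed: Replaced the backward while-loop with early break by a single forward pass that maintains the running index of the last '.' seen, then slices once.
import Mathlib
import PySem

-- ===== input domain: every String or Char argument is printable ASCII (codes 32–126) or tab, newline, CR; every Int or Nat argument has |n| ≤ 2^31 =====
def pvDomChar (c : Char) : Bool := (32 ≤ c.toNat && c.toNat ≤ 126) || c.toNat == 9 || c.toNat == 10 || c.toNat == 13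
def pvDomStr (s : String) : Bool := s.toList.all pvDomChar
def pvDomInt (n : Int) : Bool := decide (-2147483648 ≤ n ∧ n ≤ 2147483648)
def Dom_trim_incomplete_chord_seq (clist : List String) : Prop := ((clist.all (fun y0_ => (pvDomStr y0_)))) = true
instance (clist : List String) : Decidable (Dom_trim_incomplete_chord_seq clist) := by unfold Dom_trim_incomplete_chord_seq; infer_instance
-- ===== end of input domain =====

-- B replaces A's backward early-break scan by one forward pass tracking the last '.' index (alternative decomposition, same cost).

-- ===== PORT A =====
-- A's while loop: decrement nearest_end while it is > 0 and clist[nearest_end] != '.'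
def trimLoopA (clist : List String) : Nat → Nat
  | 0 => 0
  | n + 1 =>
      if PySem.List.pyGet? clist ((n : Int) + 1) ≠ some "." then trimLoopA clist n
      else n + 1

def trim_incomplete_chord_seq (clist : List String) : List String :=
  match PySem.List.pyGet? clist (-1) with
  | none => []   -- IndexError on the empty list; excluded by Pre_
  | some last =>
      if last = "[cls]" ∨ last = "." then clist
      else
        let nearest_end := trimLoopA clist (clist.length - 1)
        PySem.List.slice clist none (some ((nearest_end : Nat) : Int))

-- ===== PORT B =====
def trim_incomplete_chord_seq_alt (clist : List String) : List String :=
  match PySem.List.pyGet? clist (-1) with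
  | none => []   -- IndexError on the empty list; excluded by Pre_
  | some last =>
      if last = "[cls]" ∨ last = "." then clist
      else
        let last_dot := (PySem.List.pyRange 0 (clist.length : Int) 1).foldl
          (fun acc i => if PySem.List.pyGet? clist i = some "." then i else acc) (0 : Int)
        PySem.List.slice clist none (some last_dot)

-- ===== PRECONDITION & SPEC =====
-- Pre_ excludes only the empty list, on which A raises IndexError at clist[-1].
def Pre_trim_incomplete_chord_seq (clist : List String) : Prop := clist ≠ []
instance (clist : List String) : Decidable (Pre_trim_incomplete_chord_seq clist) := by unfold Pre_trim_incomplete_chord_seq; infer_instance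
def pvWitness_trim_incomplete_chord_seq : List String := ["C", ".", "maj"]

def Spec_trim_incomplete_chord_seq (clist : List String) (out : List String) : Prop := out = trim_incomplete_chord_seq_alt clist
instance (clist : List String) (out : List String) : Decidable (Spec_trim_incomplete_chord_seq clist out) := by unfold Spec_trim_incomplete_chord_seq; infer_instance

-- ===== CLAIM (what is proved, stated in full; the proofs are below) =====
def Claim_equal_trim_incomplete_chord_seq : Prop := ∀ (clist : List String), Dom_trim_incomplete_chord_seq clist → Pre_trim_incomplete_chord_seq clist → Spec_trim_incomplete_chord_seq clist (trim_incomplete_chord_seq clist)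

-- ===== LEMMAS AND PROOFS =====

-- B's forward fold up to index n equals A's backward loop started at n.
theorem foldB_eq_loopA (clist : List String) (n : Nat) :
    (PySem.List.pyRange 0 ((n : Int) + 1) 1).foldl
      (fun acc i => if PySem.List.pyGet? clist i = some "." then i else acc) (0 : Int)
    = ((trimLoopA clist n : Nat) : Int) := by
  induction n with
  | zero =>
      rw [show ((0:Nat):Int)+1 = 1 from rfl, PySem.List.pyRange_one_cons (by omega),
          PySem.List.pyRange_one_eq_nil (by omega)]
      simp [trimLoopA]
  | succ n ih =>
      push_cast
      rw [PySem.List.pyRange_one_succ_right (by omega)]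
      rw [List.foldl_append, ih]
      simp only [List.foldl]
      by_cases hd : PySem.List.pyGet? clist ((n : Int) + 1) = some "."
      · simp [trimLoopA, hd]
      · simp [trimLoopA, hd]

-- ===== VERDICT (by name: the statement is the Claim_ definition above) =====
theorem trim_incomplete_chord_seq_spec : Claim_equal_trim_incomplete_chord_seq := by
  intro clist _ hpre
  unfold Spec_trim_incomplete_chord_seq trim_incomplete_chord_seq trim_incomplete_chord_seq_alt
  obtain ⟨m, hm⟩ : ∃ m : Nat, clist.length = m + 1 := by
    cases clist with
    | nil => exact absurd rfl hpre
    | cons x xs => exact ⟨xs.length, by simp⟩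
  obtain ⟨last, hlast⟩ : ∃ last, PySem.List.pyGet? clist (-1) = some last := by
    rw [PySem.List.pyGet?_neg_one]
    exact ⟨clist.getLast hpre, List.getLast?_eq_some_getLast hpre⟩
  rw [hlast]
  by_cases hg : last = "[cls]" ∨ last = "."
  · simp [hg]
  · simp only [hg, if_false]
    have hlen : (clist.length : Int) = ((m : Int) + 1) := by omega
    rw [hlen, foldB_eq_loopA clist m, hm]
    simp
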